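-- pv_equiv track=rewrite | github.com/potiuk/pre-commit-hooks | pre_commit_hooks/insert_license.py | find_license_header_index
-- ===== SOURCE A (Python) =====
-- def find_license_header_index(src_file_content,
--                               prefixed_license,
--                               top_lines_count):
--     """
--     Returns the line number, starting from 0 and lower than `top_lines_count`,
--     where the license header comment starts in this file, or else None.
--     """
--     for i in range(top_lines_count):
--         license_match = True
--         for j, license_line in enumerate(prefixed_license):
--             if i + j >= len(src_file_content) or license_line.strip() != src_file_content[i + j].strip():
--                 license_match = False
--                 break
--         if license_match:
--             return i
--     return None
-- ===== SOURCE B (Python) =====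
-- def find_license_header_index(src_file_content,
--                               prefixed_license,
--                               top_lines_count):
--     """
--     Returns the line number, starting from 0 and lower than `top_lines_count`,
--     where the license header comment starts in this file, or else None.
--
--     Dynamic programming over license suffixes: ok[k] says whether the license
--     suffix processed so far matches the (stripped) source lines starting at k.
--     One layer per license line, processed from the last line backwards, so no
--     per-candidate window comparison is ever performed.
--     """
--     stripped_src = [line.strip() for line in src_file_content]
--     n = len(stripped_src)
--     ok = [True] * (n + 1)
--     for license_line in reversed(prefixed_license):
--         pat = license_line.strip()
--         ok = [k < n and stripped_src[k] == pat and ok[k + 1]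
--               for k in range(n + 1)]
--     for i in range(min(top_lines_count, n + 1)):
--         if ok[i]:
--             return i
--     return None
-- ===== Notes on version B (the rewrite author's own statement) =====
-- stated objective: alternative
-- what changed: B replaces A's restart-per-candidate nested window scan with a suffix dynamic program: one boolean layer per license line (processed from the last license line backwards) computes, for every source position k, whether the remaining license suffix matches there, and the answer is the first i below the clamped top bound whose table entry is true.
import Mathlib
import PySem

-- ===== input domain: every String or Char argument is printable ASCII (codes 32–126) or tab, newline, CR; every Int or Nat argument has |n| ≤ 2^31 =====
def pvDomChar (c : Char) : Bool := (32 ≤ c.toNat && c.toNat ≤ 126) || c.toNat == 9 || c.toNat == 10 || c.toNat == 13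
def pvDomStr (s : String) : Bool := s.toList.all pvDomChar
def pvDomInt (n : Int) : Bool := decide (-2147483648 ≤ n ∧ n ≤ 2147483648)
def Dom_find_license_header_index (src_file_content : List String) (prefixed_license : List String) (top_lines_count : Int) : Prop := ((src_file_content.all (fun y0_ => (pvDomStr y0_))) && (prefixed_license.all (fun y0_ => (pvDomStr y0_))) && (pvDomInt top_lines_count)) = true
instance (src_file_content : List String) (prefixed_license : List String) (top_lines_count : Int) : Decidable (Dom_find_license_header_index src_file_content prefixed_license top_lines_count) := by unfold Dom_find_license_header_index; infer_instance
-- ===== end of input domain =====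

-- B replaces A's restart-per-candidate nested window scan by a suffix dynamic program:
-- one boolean layer per license line marks, for each source position, whether the
-- remaining license suffix matches there (objective: alternative algorithm, same cost class).

-- ===== PORT A =====
-- inner 'for j, license_line in enumerate(prefixed_license): … break' loop: returns license_match
def pvGoA (src_file_content : List String) (i : Int) : List (Int × String) → Bool
  | [] => true
  | (j, license_line) :: rest =>
      if (src_file_content.length : Int) ≤ i + j ∨
          PySem.Str.strip license_line ≠
            PySem.Str.strip ((PySem.List.pyGet? src_file_content (i + j)).getD "") then
        false  -- license_match = False; break   (index is guarded, so pyGet? is some here)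
      else pvGoA src_file_content i rest

-- outer 'for i in range(top_lines_count): … return i' loop
def pvLoopA (src_file_content prefixed_license : List String) : List Int → Option Int
  | [] => none
  | i :: rest =>
      if pvGoA src_file_content i (PySem.List.enumerate prefixed_license 0) then some i
      else pvLoopA src_file_content prefixed_license rest

def find_license_header_index (src_file_content : List String) (prefixed_license : List String) (top_lines_count : Int) : Option Int :=
  pvLoopA src_file_content prefixed_license (PySem.List.pyRange 0 top_lines_count 1)

-- ===== PORT B =====
-- one DP layer: '[k < n and stripped_src[k] == pat and ok[k+1] for k in range(n+1)]'
-- (the 'k < n' guard makes both indexings in range, so getD is exact)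
def pvLayerB (stripped_src : List String) (pat : String) (ok : List Bool) : List Bool :=
  (List.range (stripped_src.length + 1)).map (fun k =>
    decide (k < stripped_src.length) && (stripped_src.getD k "" == pat) && ok.getD (k + 1) false)

def find_license_header_index_alt (src_file_content : List String) (prefixed_license : List String) (top_lines_count : Int) : Option Int :=
  let stripped_src := src_file_content.map PySem.Str.strip
  let n := stripped_src.length
  -- ok = [True] * (n + 1); for license_line in reversed(prefixed_license): ok = <layer>
  let ok := prefixed_license.reverse.foldl
      (fun ok license_line => pvLayerB stripped_src (PySem.Str.strip license_line) ok)
      (List.replicate (n + 1) true)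
  -- for i in range(min(top_lines_count, n + 1)): if ok[i]: return i
  (PySem.List.pyRange 0 (min top_lines_count ((n : Int) + 1)) 1).find?
    (fun i => ok.getD i.toNat false)

-- ===== PRECONDITION & SPEC =====
def Spec_find_license_header_index (src_file_content : List String) (prefixed_license : List String) (top_lines_count : Int) (out : Option Int) : Prop := out = find_license_header_index_alt src_file_content prefixed_license top_lines_count
instance (src_file_content : List String) (prefixed_license : List String) (top_lines_count : Int) (out : Option Int) : Decidable (Spec_find_license_header_index src_file_content prefixed_license top_lines_count out) := by unfold Spec_find_license_header_index; infer_instance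

-- ===== CLAIM (what is proved, stated in full; the proofs are below) =====
def Claim_equal_find_license_header_index : Prop := ∀ (src_file_content : List String) (prefixed_license : List String) (top_lines_count : Int), Dom_find_license_header_index src_file_content prefixed_license top_lines_count → Spec_find_license_header_index src_file_content prefixed_license top_lines_count (find_license_header_index src_file_content prefixed_license top_lines_count)

-- ===== LEMMAS AND PROOFS =====

-- A's inner loop succeeds exactly when the stripped slice of length |lic| starting at i+s equals the stripped license.
lemma pvGoA_iff (src : List String) (lic : List String) : ∀ (i s : Int), 0 ≤ i + s →
    (pvGoA src i (PySem.List.enumerate lic s) = true ↔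
      ((src.map PySem.Str.strip).drop (i + s).toNat).take lic.length = lic.map PySem.Str.strip) := by
  induction lic with
  | nil => intro i s h; simp [PySem.List.enumerate_nil, pvGoA]
  | cons l ls ih =>
    intro i s h
    rw [PySem.List.enumerate_cons]
    obtain ⟨a, ha⟩ : ∃ a : Nat, i + s = (a : Int) := ⟨(i + s).toNat, by omega⟩
    have htn : (i + s).toNat = a := by omega
    by_cases hlen : (src.length : Int) ≤ i + s
    · have hd : (List.map PySem.Str.strip src).drop (i + s).toNat = [] :=
        List.drop_eq_nil_of_le (by simp; omega)
      simp [pvGoA, hlen, hd]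
    · have hlt : i + s < (src.length : Int) := lt_of_not_ge hlen
      have hnat : a < src.length := by omega
      have hget : PySem.List.pyGet? src (i + s) = some src[a] := by
        rw [ha]; simp [pysem, List.getElem?_eq_getElem hnat]
      have hdrop : (List.map PySem.Str.strip src).drop (i + s).toNat
          = PySem.Str.strip src[a] :: (List.map PySem.Str.strip src).drop (a + 1) := by
        rw [htn, List.drop_eq_getElem_cons (by simpa using hnat)]
        simp
      simp only [pvGoA, hget, Option.getD_some]
      have hih := ih i (s + 1) (by omega)
      have hcast : (i + (s + 1)).toNat = a + 1 := by omega
      rw [hcast] at hih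
      by_cases hne : PySem.Str.strip l = PySem.Str.strip src[a]
      · rw [if_neg (fun hx => hx.elim (fun h1 => absurd h1 hlen) (fun h2 => h2 hne)), hih, hdrop]
        simp [hne]
      · rw [if_pos (Or.inr hne), hdrop]
        simp only [List.map_cons, List.length_cons, List.take_succ_cons, Bool.false_eq_true,
          false_iff, List.cons.injEq, not_and]
        intro h1
        exact absurd h1.symm hne

lemma pvLoopA_eq_find? (src lic : List String) (is : List Int) :
    pvLoopA src lic is = is.find? (fun i => pvGoA src i (PySem.List.enumerate lic 0)) := by
  induction is with
  | nil => rfl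
  | cons i rest ih =>
    simp only [pvLoopA, List.find?_cons, ih]
    by_cases hg : pvGoA src i (PySem.List.enumerate lic 0) = true <;> simp [hg]

lemma find?_congr_mem {l : List Int} {p q : Int → Bool} (h : ∀ x ∈ l, p x = q x) :
    l.find? p = l.find? q := by
  induction l with
  | nil => rfl
  | cons x xs ih =>
    simp only [List.find?_cons, h x (by simp)]
    cases hq : q x
    · exact ih (fun y hy => h y (by simp [hy]))
    · rfl

-- the DP table after processing the license suffix L: entry k says "L matches at k"
lemma pvOk_getD (S' : List String) (L : List String) :
    ∀ k : Nat,
      ((L.foldr (fun line ok => pvLayerB S' (PySem.Str.strip line) ok)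
          (List.replicate (S'.length + 1) true)).getD k false)
        = decide (k + L.length ≤ S'.length ∧ (S'.drop k).take L.length = L.map PySem.Str.strip) := by
  induction L with
  | nil =>
    intro k
    by_cases hk : k < S'.length + 1
    · simp [List.getD, hk]; omega
    · simp [List.getD, hk]; omega
  | cons l ls ih =>
    intro k
    simp only [List.foldr_cons]
    by_cases hk : k < S'.length + 1
    · have hmap : (pvLayerB S' (PySem.Str.strip l)
            (ls.foldr (fun line ok => pvLayerB S' (PySem.Str.strip line) ok)
              (List.replicate (S'.length + 1) true))).getD k false
          = (decide (k < S'.length) && (S'.getD k "" == PySem.Str.strip l) &&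
              (ls.foldr (fun line ok => pvLayerB S' (PySem.Str.strip line) ok)
                (List.replicate (S'.length + 1) true)).getD (k + 1) false) := by
        simp [pvLayerB, List.getD, hk]
      rw [hmap, ih (k + 1)]
      by_cases hkn : k < S'.length
      · have hgetD : S'.getD k "" = S'[k] := List.getD_eq_getElem S' "" hkn
        have hdrop : S'.drop k = S'[k] :: S'.drop (k + 1) := List.drop_eq_getElem_cons hkn
        rw [hgetD, hdrop]
        simp only [List.length_cons, List.map_cons, List.take_succ_cons,
          hkn, decide_true, Bool.true_and]
        rw [Bool.eq_iff_iff]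
        simp only [Bool.and_eq_true, beq_iff_eq, decide_eq_true_eq, List.cons.injEq]
        constructor
        · rintro ⟨h1, h2, h3⟩; exact ⟨by omega, h1, h3⟩
        · rintro ⟨h1, h2, h3⟩; exact ⟨h2, by omega, h3⟩
      · simp only [hkn, decide_false, Bool.false_and]
        have : ¬ (k + (ls.length + 1) ≤ S'.length) := by omega
        simp [this]
    · have hge : (pvLayerB S' (PySem.Str.strip l)
            (ls.foldr (fun line ok => pvLayerB S' (PySem.Str.strip line) ok)
              (List.replicate (S'.length + 1) true))).getD k false = false := by
        simp [pvLayerB, List.getD, hk]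
      rw [hge]
      have : ¬ (k + (ls.length + 1) ≤ S'.length) := by omega
      simp [this]

-- drop candidates past c when the predicate is false from c onwards
lemma pvClamp (p : Int → Bool) (top c : Int) (h0 : 0 ≤ c) (hp : ∀ i, c ≤ i → p i = false) :
    (PySem.List.pyRange 0 top 1).find? p = (PySem.List.pyRange 0 (min top c) 1).find? p := by
  by_cases htc : top ≤ c
  · rw [min_eq_left htc]
  · have htc' : c < top := lt_of_not_ge htc
    rw [min_eq_right (le_of_lt htc')]
    rw [PySem.List.pyRange_one_append 0 c top h0 (le_of_lt htc'), List.find?_append]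
    cases hh : (PySem.List.pyRange 0 c 1).find? p with
    | some v => simp
    | none =>
      simp only [Option.none_or]
      apply List.find?_eq_none.mpr
      intro x hx
      rw [PySem.List.mem_pyRange_one] at hx
      simp [hp x hx.1]

lemma find?_true_head (l : List Int) : l.find? (fun _ => true) = l.head? := by
  cases l <;> simp

-- ===== VERDICT (by name: the statement is the Claim_ definition above) =====
theorem find_license_header_index_spec : Claim_equal_find_license_header_index := by
  unfold Claim_equal_find_license_header_index Spec_find_license_header_index
  intro src lic top _dom
  simp only [find_license_header_index, find_license_header_index_alt]
  rw [pvLoopA_eq_find?]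
  rw [← List.foldr_reverse, List.reverse_reverse] at *
  set S' := src.map PySem.Str.strip with hS'
  have hlen : S'.length = src.length := by simp [hS']
  have hok : ∀ k : Nat,
      ((lic.foldr (fun line ok => pvLayerB S' (PySem.Str.strip line) ok)
          (List.replicate (S'.length + 1) true)).getD k false)
        = decide (k + lic.length ≤ S'.length ∧ (S'.drop k).take lic.length = lic.map PySem.Str.strip) :=
    pvOk_getD S' lic
  rcases lic with _ | ⟨l, ls⟩
  · -- empty license: both sides return the first candidate index, if any
    have hA : (PySem.List.pyRange 0 top 1).find?
        (fun i => pvGoA src i (PySem.List.enumerate ([] : List String) 0)) =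
        (PySem.List.pyRange 0 top 1).head? := by
      rw [← find?_true_head]
      exact find?_congr_mem (fun x _ => by simp [PySem.List.enumerate_nil, pvGoA])
    have hB : (PySem.List.pyRange 0 (min top ((S'.length : Int) + 1)) 1).find?
        (fun i => (List.foldr (fun line ok => pvLayerB S' (PySem.Str.strip line) ok)
            (List.replicate (S'.length + 1) true) ([] : List String)).getD i.toNat false) =
        (PySem.List.pyRange 0 (min top ((S'.length : Int) + 1)) 1).head? := by
      rw [← find?_true_head]
      apply find?_congr_mem
      intro x hx
      rw [PySem.List.mem_pyRange_one] at hx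
      rw [show (List.foldr (fun line ok => pvLayerB S' (PySem.Str.strip line) ok)
            (List.replicate (S'.length + 1) true) ([] : List String)) =
          (([] : List String).foldr (fun line ok => pvLayerB S' (PySem.Str.strip line) ok)
            (List.replicate (S'.length + 1) true)) from rfl, hok x.toNat]
      simp only [List.length_nil, Nat.add_zero, List.take_zero, List.map_nil, and_true,
        decide_eq_true_eq]
      omega
    rw [hA, hB]
    by_cases htop : 1 ≤ top
    · have h2 : (0:Int) < min top ((S'.length : Int) + 1) := by
        rw [lt_min_iff]
        constructor <;> omega
      rw [PySem.List.pyRange_one_cons (show (0:Int) < top by omega),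
        PySem.List.pyRange_one_cons h2]
      simp
    · rw [PySem.List.pyRange_one_eq_nil (by omega), PySem.List.pyRange_one_eq_nil (by omega)]
  · -- nonempty license
    set L := l :: ls with hL
    have hm1 : 1 ≤ L.length := by simp [hL]
    -- A's predicate equals the decide form everywhere on the range
    have h1 : (PySem.List.pyRange 0 top 1).find? (fun i => pvGoA src i (PySem.List.enumerate L 0))
        = (PySem.List.pyRange 0 top 1).find?
            (fun i => decide (i.toNat + L.length ≤ S'.length ∧
              (S'.drop i.toNat).take L.length = L.map PySem.Str.strip)) := by
      apply find?_congr_mem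
      intro x hx
      rw [PySem.List.mem_pyRange_one] at hx
      have hiff := pvGoA_iff src L x 0 (by omega)
      rw [add_zero, ← hS'] at hiff
      rw [Bool.eq_iff_iff, hiff, decide_eq_true_eq]
      constructor
      · intro hw
        refine ⟨?_, hw⟩
        have := congrArg List.length hw
        simp only [List.length_take, List.length_drop, List.length_map] at this
        omega
      · exact And.right
    rw [h1]
    rw [pvClamp _ top ((S'.length : Int) + 1) (by omega)
      (fun i hi => by
        have : ¬ (i.toNat + L.length ≤ S'.length) := by omega
        simp [this])]
    apply find?_congr_mem
    intro x hx
    rw [PySem.List.mem_pyRange_one] at hx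
    rw [hok x.toNat]
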